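-- pv_equiv track=rewrite | github.com/sezanhaque/leetcode | Data Structures & Algorithms/Bit Manipulation.py | magicNumber
-- ===== SOURCE A (Python) =====
-- def magicNumber(num: int) -> int:
--     """
--     *** Amazon question ***
--
--     Represent the num into binary number
--     Then from the last digit, multiply that digit
--     with 5^idx and add it to the result.
--
--     Ex: num = 5 = 101
--     from last digit => 1 * 5^1 + 0 * 5^2 + 1 * 5^3 = 5 + 0 + 125 = 130
--
--     So, 5th magic number is 125.
--     """
--     res, base = 0, 5
--
--     while num > 0:
--         # get the last binary digit using &
--         last = num & 1
--
--         # Right shift the num so that we can get next last digit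
--         num = num >> 1
--
--         res += last * base
--         base *= 5
--
--     return res
-- ===== SOURCE B (Python) =====
-- def magicNumber(num: int) -> int:
--     # Simpler: direct recursion (Horner form), no accumulator pair.
--     if num <= 0:
--         return 0
--     return 5 * ((num & 1) + magicNumber(num >> 1))
-- ===== Notes on version B (the rewrite author's own statement) =====
-- stated objective: simpler
-- what changed: Replaced the iterative loop carrying res/base accumulators with a direct recursion in Horner form, 5*(lowbit + f(num>>1)), eliminating both accumulator variables.
import Mathlib
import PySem

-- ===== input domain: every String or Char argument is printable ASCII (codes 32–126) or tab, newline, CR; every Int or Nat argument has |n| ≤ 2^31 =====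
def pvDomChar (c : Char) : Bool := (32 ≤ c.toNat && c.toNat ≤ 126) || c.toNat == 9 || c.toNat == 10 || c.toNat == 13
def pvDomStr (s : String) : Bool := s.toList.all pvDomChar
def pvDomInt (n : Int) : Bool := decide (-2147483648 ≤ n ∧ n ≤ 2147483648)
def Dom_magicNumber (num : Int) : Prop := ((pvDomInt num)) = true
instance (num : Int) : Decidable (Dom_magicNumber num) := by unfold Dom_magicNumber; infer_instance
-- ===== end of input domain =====

-- B replaces A's loop with its res/base accumulators by a direct recursion in
-- Horner form, 5*(lowbit + f(num >> 1)): simpler (no accumulators), same cost.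

-- termination helper for both recursions (the port cites it by name)
theorem pvShiftToNatLt (n : Int) (h : 0 < n) : (n >>> (1 : Nat)).toNat < n.toNat := by
  rw [Int.shiftRight_eq_div_pow]
  norm_num
  omega

-- ===== PORT A =====
-- while num > 0: last = num & 1; num = num >> 1; res += last * base; base *= 5
def magicNumberLoop (num res base : Int) : Int :=
  if 0 < num then
    magicNumberLoop (num >>> (1 : Nat)) (res + PySem.Int.band num 1 * base) (base * 5)
  else res
termination_by num.toNat
decreasing_by exact pvShiftToNatLt _ (by omega)

def magicNumber (num : Int) : Int :=
  magicNumberLoop num 0 5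

-- ===== PORT B =====
def magicNumber_alt (num : Int) : Int :=
  if num ≤ 0 then 0
  else 5 * (PySem.Int.band num 1 + magicNumber_alt (num >>> (1 : Nat)))
termination_by num.toNat
decreasing_by exact pvShiftToNatLt _ (by omega)

-- ===== PRECONDITION & SPEC =====
def Spec_magicNumber (num : Int) (out : Int) : Prop := out = magicNumber_alt num
instance (num : Int) (out : Int) : Decidable (Spec_magicNumber num out) := by unfold Spec_magicNumber; infer_instance

-- ===== CLAIM (what is proved, stated in full; the proofs are below) =====
def Claim_equal_magicNumber : Prop := ∀ (num : Int), Dom_magicNumber num → Spec_magicNumber num (magicNumber num)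

-- ===== LEMMAS AND PROOFS =====
-- Loop invariant: with the base accumulator written as 5*b, the loop adds b times B's value.
theorem magicNumberLoop_eq (k : Nat) : ∀ (n : Int), n.toNat ≤ k → ∀ (res b : Int),
    magicNumberLoop n res (5 * b) = res + b * magicNumber_alt n := by
  induction k with
  | zero =>
    intro n hn res b
    have h0 : ¬ 0 < n := by omega
    rw [magicNumberLoop, magicNumber_alt, if_neg h0, if_pos (by omega)]
    ring
  | succ k ih =>
    intro n hn res b
    by_cases h : 0 < n
    · rw [magicNumberLoop, magicNumber_alt, if_pos h, if_neg (by omega)]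
      have hlt := pvShiftToNatLt n h
      have : magicNumberLoop (n >>> (1 : Nat)) (res + PySem.Int.band n 1 * (5 * b)) (5 * b * 5)
          = res + PySem.Int.band n 1 * (5 * b) + 5 * b * magicNumber_alt (n >>> (1 : Nat)) := by
        have := ih (n >>> (1 : Nat)) (by omega) (res + PySem.Int.band n 1 * (5 * b)) (5 * b)
        calc magicNumberLoop (n >>> (1 : Nat)) (res + PySem.Int.band n 1 * (5 * b)) (5 * b * 5)
            = magicNumberLoop (n >>> (1 : Nat)) (res + PySem.Int.band n 1 * (5 * b)) (5 * (5 * b)) := by ring_nf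
          _ = _ := this
      rw [this]
      ring
    · rw [magicNumberLoop, magicNumber_alt, if_neg h, if_pos (by omega)]
      ring

-- ===== VERDICT (by name: the statement is the Claim_ definition above) =====
theorem magicNumber_spec : Claim_equal_magicNumber := by
  intro num _
  unfold Spec_magicNumber magicNumber
  have := magicNumberLoop_eq num.toNat num (le_refl _) 0 1
  simpa using this
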